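-- pv_equiv track=rewrite | github.com/aravindas4/snippetbox-1 | leets/closest_minmax.py | solve
-- ===== SOURCE A (Python) =====
-- def solve(A):
--     N = len(A)
--     imax = -1
--     imin = -1
--     leng = N
--
--     maxe = A[0]
--     mine = A[0]
--
--     for num in A:
--         if num > maxe:
--             maxe = num
--         elif num < mine:
--             mine = num
--
--     if maxe == mine:
--         return 1
--
--     for ind in range(N-1, -1, -1):
--         if A[ind] == maxe:
--             imax = ind
--             if imin != -1:
--                 leng = min(leng, imin - imax + 1)
--         elif A[ind] == mine:
--             imin = ind
--             if imax != -1: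
--                 leng = min(leng, imax - imin + 1)
--
--     return leng
-- ===== SOURCE B (Python) =====
-- def solve(A):
--     maxe = max(A)
--     mine = min(A)
--     if maxe == mine:
--         return 1
--     pos = [(i, x) for i, x in enumerate(A) if x == maxe or x == mine]
--     best = len(A)
--     for (i, x), (j, y) in zip(pos, pos[1:]):
--         if x != y:
--             best = min(best, j - i + 1)
--     return best
-- ===== Notes on version B (the rewrite author's own statement) =====
-- stated objective: alternative
-- what changed: A's single backward index scan with -1 sentinels for the last-seen max/min is replaced by builtin max/min, a materialised list of the positions of extreme elements, and one pass over its adjacent pairs taking the shortest differing-valued window.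
import Mathlib
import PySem

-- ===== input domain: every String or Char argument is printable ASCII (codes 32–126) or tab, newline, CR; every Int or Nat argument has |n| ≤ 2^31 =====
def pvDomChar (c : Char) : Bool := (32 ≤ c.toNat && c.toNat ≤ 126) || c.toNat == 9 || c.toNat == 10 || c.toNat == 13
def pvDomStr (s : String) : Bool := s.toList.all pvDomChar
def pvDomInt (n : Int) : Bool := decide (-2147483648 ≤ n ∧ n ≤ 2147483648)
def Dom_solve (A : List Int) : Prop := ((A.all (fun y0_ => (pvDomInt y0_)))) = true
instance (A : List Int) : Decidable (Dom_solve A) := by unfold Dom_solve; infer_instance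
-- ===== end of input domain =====

-- B replaces A's backward index scan with explicit max/min via builtins, a materialised
-- list of extreme positions, and a single pass over its adjacent pairs (objective: alternative).
-- Both A and B raise on the empty list (A[0] / max([])); Pre_ excludes it.

-- ===== PORT A =====
-- first loop body: running max/min with Python's if/elif
def pvStep1 (p : Int × Int) (num : Int) : Int × Int :=
  if num > p.1 then (num, p.2) else if num < p.2 then (p.1, num) else p

-- second loop body on state (imax, imin, leng), given index ind and value x = A[ind]
def pvStep2 (maxe mine : Int) (s : Int × Int × Int) (ind x : Int) : Int × Int × Int :=
  if x = maxe then
    (ind, s.2.1, if s.2.1 ≠ -1 then min s.2.2 (s.2.1 - ind + 1) else s.2.2)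
  else if x = mine then
    (s.1, ind, if s.1 ≠ -1 then min s.2.2 (s.1 - ind + 1) else s.2.2)
  else s

def solve (A : List Int) : Int :=
  let N : Int := A.length
  let a0 : Int := (PySem.List.pyGet? A 0).getD 0   -- A[0]; empty input (IndexError) is outside Pre_
  let mm := A.foldl pvStep1 (a0, a0)
  if mm.1 = mm.2 then 1
  else
    ((PySem.List.pyRange (N - 1) (-1) (-1)).foldl
      (fun s ind => pvStep2 mm.1 mm.2 s ind (PySem.List.pyGetD A ind 0)) (-1, -1, N)).2.2

-- ===== PORT B =====
def solve_alt (A : List Int) : Int :=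
  let maxe : Int := (PySem.List.max? A (fun y => y)).getD 0   -- max(A); raises on [] (outside Pre_)
  let mine : Int := (PySem.List.min? A (fun y => y)).getD 0
  if maxe = mine then 1
  else
    let pos := (PySem.List.enumerate A 0).filter (fun p => p.2 == maxe || p.2 == mine)
    (pos.zip pos.tail).foldl
      (fun best pq => if pq.1.2 ≠ pq.2.2 then min best (pq.2.1 - pq.1.1 + 1) else best)
      (A.length : Int)

-- ===== PRECONDITION & SPEC =====
-- Pre_ excludes only the empty list, on which A raises IndexError (A[0]) and B raises ValueError (max(A)).
def Pre_solve (A : List Int) : Prop := A ≠ []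
instance (A : List Int) : Decidable (Pre_solve A) := by unfold Pre_solve; infer_instance
def pvWitness_solve : List Int := [1, 3, 1, 2]

def Spec_solve (A : List Int) (out : Int) : Prop := out = solve_alt A
instance (A : List Int) (out : Int) : Decidable (Spec_solve A out) := by unfold Spec_solve; infer_instance

-- ===== CLAIM (what is proved, stated in full; the proofs are below) =====
def Claim_equal_solve : Prop := ∀ (A : List Int), Dom_solve A → Pre_solve A → Spec_solve A (solve A)

-- ===== LEMMAS AND PROOFS =====

def adjAcc : Int → List (Int × Int) → Int
  | b, p :: q :: r => adjAcc (if p.2 ≠ q.2 then min b (q.1 - p.1 + 1) else b) (q :: r)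
  | b, _ => b

lemma zip_foldl_eq_adjAcc (P : List (Int × Int)) (b : Int) :
    (P.zip P.tail).foldl
      (fun best pq => if pq.1.2 ≠ pq.2.2 then min best (pq.2.1 - pq.1.1 + 1) else best) b
    = adjAcc b P := by
  induction P generalizing b with
  | nil => rfl
  | cons p rest ih =>
    cases rest with
    | nil => rfl
    | cons q r =>
      simp only [List.tail_cons, List.zip_cons_cons, List.foldl_cons, adjAcc]
      exact ih _

lemma adjAcc_le (P : List (Int × Int)) : ∀ b : Int, adjAcc b P ≤ b := by
  induction P with
  | nil => intro b; exact le_refl b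
  | cons p rest ih =>
    intro b
    cases rest with
    | nil => exact le_refl b
    | cons q r =>
      simp only [adjAcc]
      refine le_trans (ih _) ?_
      split <;> simp

lemma adjAcc_min (P : List (Int × Int)) : ∀ b c : Int, adjAcc (min b c) P = min (adjAcc b P) c := by
  induction P with
  | nil => intro b c; rfl
  | cons p rest ih =>
    intro b c
    cases rest with
    | nil => rfl
    | cons q r =>
      simp only [adjAcc]
      split
      · rw [(by rw [min_assoc, min_comm c, ← min_assoc] : min (min b c) (q.1 - p.1 + 1) = min (min b (q.1 - p.1 + 1)) c)]
        exact ih _ _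
      · exact ih _ _

def firstIdx (v : Int) (P : List (Int × Int)) : Int :=
  match P.find? (fun p => p.2 == v) with
  | some p => p.1
  | none => -1

lemma firstIdx_nil (v : Int) : firstIdx v [] = -1 := rfl

lemma firstIdx_cons_neg (v : Int) (p : Int × Int) (rest : List (Int × Int)) (h : p.2 ≠ v) :
    firstIdx v (p :: rest) = firstIdx v rest := by
  unfold firstIdx
  rw [List.find?_cons, show (p.2 == v) = false from by simp [h]]

lemma firstIdx_cons_pos (v : Int) (p : Int × Int) (rest : List (Int × Int)) (h : p.2 = v) :
    firstIdx v (p :: rest) = p.1 := by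
  unfold firstIdx
  rw [List.find?_cons, show (p.2 == v) = true from by simp [h]]

lemma adjAcc_dom (u v : Int) (hne : u ≠ v) :
    ∀ (r : List (Int × Int)) (q : Int × Int) (b i : Int), q.2 = u →
      (∀ p ∈ q :: r, p.2 = u ∨ p.2 = v) →
      (q :: r).Pairwise (fun p p' => p.1 < p'.1) →
      i ≤ q.1 → firstIdx v (q :: r) ≠ -1 →
      adjAcc b (q :: r) ≤ firstIdx v (q :: r) - i + 1 := by
  intro r
  induction r with
  | nil =>
    intro q b i hq _ _ _ hfi
    exact absurd (by rw [firstIdx_cons_neg v q [] (by rw [hq]; exact hne), firstIdx_nil]) hfi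
  | cons z r' ih =>
    intro q b i hq htypes hpw hi hfi
    have hqv : (q.2 == v) = false := by simp [hq, hne]
    have hfirst : firstIdx v (q :: z :: r') = firstIdx v (z :: r') :=
      firstIdx_cons_neg v q _ (by rw [hq]; exact hne)
    rw [hfirst] at hfi ⊢
    have hqz : q.1 < z.1 := (List.pairwise_cons.mp hpw).1 z (by simp)
    rcases htypes z (by simp) with hz | hz
    · -- z is also a u: skip pair, recurse
      have : adjAcc b (q :: z :: r') = adjAcc b (z :: r') := by
        simp [adjAcc, hq, hz]
      rw [this]
      exact ih z b i hz (fun p hp => htypes p (by simp at hp ⊢; tauto)) hpw.tail (by omega) hfi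
    · -- z is a v: the adjacent pair (q,z) witnesses the bound
      have hzv : (z.2 == v) = true := by simp [hz]
      have hfz : firstIdx v (z :: r') = z.1 := firstIdx_cons_pos v z r' hz
      rw [hfz]
      have hne' : q.2 ≠ z.2 := by rw [hq, hz]; exact hne
      have : adjAcc b (q :: z :: r') = adjAcc (min b (z.1 - q.1 + 1)) (z :: r') := by
        simp [adjAcc, hne']
      rw [this]
      calc adjAcc (min b (z.1 - q.1 + 1)) (z :: r') ≤ min b (z.1 - q.1 + 1) := adjAcc_le _ _
        _ ≤ z.1 - q.1 + 1 := min_le_right _ _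
        _ ≤ z.1 - i + 1 := by omega

lemma scan_eq (maxe mine N0 : Int) (hne : maxe ≠ mine) :
    ∀ (P : List (Int × Int)),
      (∀ p ∈ P, (p.2 = maxe ∨ p.2 = mine) ∧ 0 ≤ p.1) →
      P.Pairwise (fun p p' => p.1 < p'.1) →
      P.foldr (fun p s => pvStep2 maxe mine s p.1 p.2) (-1, -1, N0)
        = (firstIdx maxe P, firstIdx mine P, adjAcc N0 P) := by
  intro P
  induction P with
  | nil => intro _ _; rfl
  | cons p rest ih =>
    intro htypes hpw
    have hrest := ih (fun q hq => htypes q (List.mem_cons_of_mem _ hq)) hpw.tail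
    rw [List.foldr_cons, hrest]
    rcases htypes p (List.mem_cons_self) with ⟨hp | hp, hpos⟩
    · -- p carries the max value
      rw [firstIdx_cons_pos maxe p rest hp,
          firstIdx_cons_neg mine p rest (by rw [hp]; exact hne)]
      unfold pvStep2
      rw [if_pos hp]
      simp only [Prod.mk.injEq]
      refine ⟨trivial, trivial, ?_⟩
      cases rest with
      | nil => simp [firstIdx_nil, adjAcc]
      | cons z r' =>
        have hpz : p.1 < z.1 := (List.pairwise_cons.mp hpw).1 z (by simp)
        rcases htypes z (by simp) with ⟨hz | hz, hzpos⟩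
        · -- next extreme is also a max: pair skipped; domination
          rw [firstIdx_cons_neg mine z r' (by rw [hz]; exact hne)]
          have hskip : adjAcc N0 (p :: z :: r') = adjAcc N0 (z :: r') := by
            simp [adjAcc, hp, hz]
          rw [hskip]
          by_cases hfi : firstIdx mine (z :: r') = -1
          · rw [firstIdx_cons_neg mine z r' (by rw [hz]; exact hne)] at hfi
            simp [hfi]
          · rw [firstIdx_cons_neg mine z r' (by rw [hz]; exact hne)] at hfi
            rw [if_pos hfi]
            refine min_eq_left ?_
            have := adjAcc_dom maxe mine hne r' z N0 p.1 hz
              (fun q hq => (htypes q (List.mem_cons_of_mem _ hq)).1) hpw.tail (le_of_lt hpz)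
              (by rw [firstIdx_cons_neg mine z r' (by rw [hz]; exact hne)]; exact hfi)
            rw [firstIdx_cons_neg mine z r' (by rw [hz]; exact hne)] at this
            exact this
        · -- next extreme is a min: new adjacent pair
          rw [firstIdx_cons_pos mine z r' hz]
          rw [if_pos (by omega : z.1 ≠ -1)]
          have hpair : adjAcc N0 (p :: z :: r') = adjAcc (min N0 (z.1 - p.1 + 1)) (z :: r') := by
            simp [adjAcc, show p.2 ≠ z.2 from by rw [hp, hz]; exact hne]
          rw [hpair, adjAcc_min]
    · -- p carries the min value
      rw [firstIdx_cons_neg maxe p rest (by rw [hp]; exact hne.symm),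
          firstIdx_cons_pos mine p rest hp]
      unfold pvStep2
      rw [if_neg (show ¬ (p.2 = maxe) from by rw [hp]; exact hne.symm), if_pos hp]
      simp only [Prod.mk.injEq]
      refine ⟨trivial, trivial, ?_⟩
      cases rest with
      | nil => simp [firstIdx_nil, adjAcc]
      | cons z r' =>
        have hpz : p.1 < z.1 := (List.pairwise_cons.mp hpw).1 z (by simp)
        rcases htypes z (by simp) with ⟨hz | hz, hzpos⟩
        · -- next extreme is a max: new adjacent pair
          rw [firstIdx_cons_pos maxe z r' hz]
          rw [if_pos (by omega : z.1 ≠ -1)]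
          have hpair : adjAcc N0 (p :: z :: r') = adjAcc (min N0 (z.1 - p.1 + 1)) (z :: r') := by
            simp [adjAcc, show p.2 ≠ z.2 from by rw [hp, hz]; exact hne.symm]
          rw [hpair, adjAcc_min]
        · -- next extreme is also a min: pair skipped; domination
          rw [firstIdx_cons_neg maxe z r' (by rw [hz]; exact hne.symm)]
          have hskip : adjAcc N0 (p :: z :: r') = adjAcc N0 (z :: r') := by
            simp [adjAcc, hp, hz]
          rw [hskip]
          by_cases hfi : firstIdx maxe (z :: r') = -1
          · rw [firstIdx_cons_neg maxe z r' (by rw [hz]; exact hne.symm)] at hfi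
            simp [hfi]
          · rw [firstIdx_cons_neg maxe z r' (by rw [hz]; exact hne.symm)] at hfi
            rw [if_pos hfi]
            refine min_eq_left ?_
            have := adjAcc_dom mine maxe hne.symm r' z N0 p.1 hz
              (fun q hq => ((htypes q (List.mem_cons_of_mem _ hq)).1).symm) hpw.tail (le_of_lt hpz)
              (by rw [firstIdx_cons_neg maxe z r' (by rw [hz]; exact hne.symm)]; exact hfi)
            rw [firstIdx_cons_neg maxe z r' (by rw [hz]; exact hne.symm)] at this
            exact this

lemma loop1_eq (l : List Int) : ∀ a b : Int, b ≤ a →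
    l.foldl pvStep1 (a, b) = (l.foldl max a, l.foldl min b) := by
  induction l with
  | nil => intro a b _; rfl
  | cons x t ih =>
    intro a b hba
    simp only [List.foldl_cons]
    by_cases h1 : x > a
    · rw [show pvStep1 (a, b) x = (x, b) from by simp [pvStep1, h1],
        max_eq_right (le_of_lt h1), min_eq_left (by omega)]
      exact ih x b (by omega)
    · by_cases h2 : x < b
      · rw [show pvStep1 (a, b) x = (a, x) from by simp [pvStep1, h1, h2],
          max_eq_left (by omega), min_eq_right (by omega)]
        exact ih a x (by omega)
      · rw [show pvStep1 (a, b) x = (a, b) from by simp [pvStep1, h1, h2],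
          max_eq_left (by omega), min_eq_left (by omega)]
        exact ih a b hba

lemma pyGetD_cons_shift (x : Int) (xs : List Int) (i : Int) (h : 1 ≤ i) (d : Int) :
    PySem.List.pyGetD (x :: xs) i d = PySem.List.pyGetD xs (i-1) d := by
  simp only [PySem.List.pyGetD, PySem.List.pyGet?, PySem.List.pyIdx?, List.length_cons]
  rw [if_pos (by omega : (0:Int) ≤ i), if_pos (by omega : (0:Int) ≤ i - 1)]
  by_cases hlt : i - 1 < (xs.length : Int)
  · rw [if_pos (by push_cast; omega), if_pos hlt]
    rw [(by omega : i.toNat = (i-1).toNat + 1)]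
    rfl
  · rw [if_neg (by push_cast; omega), if_neg hlt]
    simp

lemma mem_enumerate_lb (xs : List Int) : ∀ (s : Int) (p : Int × Int),
    p ∈ PySem.List.enumerate xs s → s ≤ p.1 := by
  intro s p hp
  have h1 : p.1 ∈ (PySem.List.enumerate xs s).map (·.1) := List.mem_map_of_mem hp
  rw [PySem.List.map_fst_enumerate] at h1
  exact (PySem.List.mem_pyRange_one.mp h1).1

lemma lookup_enumerate_gen (A : List Int) : ∀ (s : Int) (p : Int × Int),
    p ∈ PySem.List.enumerate A s → PySem.List.pyGetD A (p.1 - s) 0 = p.2 := by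
  induction A with
  | nil => intro s p hp; simp [PySem.List.enumerate] at hp
  | cons x xs ih =>
    intro s p hp
    rw [PySem.List.enumerate_cons] at hp
    rcases List.mem_cons.mp hp with h | h
    · subst h
      simp [PySem.List.pyGetD_zero_cons]
    · have hlb : s + 1 ≤ p.1 := mem_enumerate_lb xs (s+1) p h
      rw [pyGetD_cons_shift x xs (p.1 - s) (by omega) 0,
        show p.1 - s - 1 = p.1 - (s + 1) from by ring]
      exact ih (s+1) p h

lemma solve_cons (h : Int) (t : List Int) : solve (h :: t) = solve_alt (h :: t) := by
  simp only [solve, solve_alt]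
  have ha0 : (PySem.List.pyGet? (h :: t) 0).getD 0 = h := by
    have := PySem.List.pyGetD_zero_cons (x := h) (xs := t) (d := (0:Int))
    simp only [PySem.List.pyGetD] at this; exact this
  have hmm : List.foldl pvStep1 (h, h) (h :: t) = (t.foldl max h, t.foldl min h) := by
    rw [List.foldl_cons, show pvStep1 (h, h) h = (h, h) from by simp [pvStep1]]
    exact loop1_eq t h h le_rfl
  have hmax : (PySem.List.max? (h :: t) fun y => y).getD 0 = t.foldl max h := by
    rw [PySem.List.max?_id_cons]; rfl
  have hmin : (PySem.List.min? (h :: t) fun y => y).getD 0 = t.foldl min h := by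
    rw [PySem.List.min?_id_cons]; rfl
  rw [ha0, hmm, hmax, hmin]
  set M := t.foldl max h with hM
  set m := t.foldl min h with hm
  by_cases hMm : M = m
  · simp [hMm]
  · rw [if_neg hMm, if_neg hMm]
    set E := PySem.List.enumerate (h :: t) 0 with hE
    set pred : Int × Int → Bool := fun p => p.2 == M || p.2 == m with hpred
    -- A side: countdown range is the reverse of enumerate's index range
    have hrange : PySem.List.pyRange (((h::t).length : Int) - 1) (-1) (-1)
        = (E.map (·.1)).reverse := by
      rw [PySem.List.pyRange_neg_one_eq_reverse, hE, PySem.List.map_fst_enumerate]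
      norm_num
    rw [hrange, List.foldl_reverse, List.foldr_map]
    -- replace the indexed lookup by the enumerated value
    have hlook : E.foldr (fun p s => pvStep2 M m s p.1 (PySem.List.pyGetD (h :: t) p.1 0))
          (-1, -1, ((h::t).length : Int))
        = E.foldr (fun p s => pvStep2 M m s p.1 p.2) (-1, -1, ((h::t).length : Int)) := by
      refine List.foldr_ext _ _ _ ?_
      intro p hp acc
      have := lookup_enumerate_gen (h :: t) 0 p hp
      rw [sub_zero] at this
      rw [this]
    rw [hlook]
    -- drop the non-extreme elements: fold over the filtered position list
    have hfilter : E.foldr (fun p s => pvStep2 M m s p.1 p.2) (-1, -1, ((h::t).length : Int))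
        = (E.filter pred).foldr (fun p s => pvStep2 M m s p.1 p.2)
            (-1, -1, ((h::t).length : Int)) := by
      rw [List.foldr_filter]
      refine List.foldr_ext _ _ _ ?_
      intro p hp acc
      by_cases hpp : pred p = true
      · rw [if_pos hpp]
      · rw [if_neg hpp]
        have h1 : p.2 ≠ M := by simp [hpred] at hpp; exact hpp.1
        have h2 : p.2 ≠ m := by simp [hpred] at hpp; exact hpp.2
        simp [pvStep2, h1, h2]
    rw [hfilter]
    -- invariants of the filtered list
    have htypesP : ∀ p ∈ E.filter pred, (p.2 = M ∨ p.2 = m) ∧ 0 ≤ p.1 := by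
      intro p hp
      refine ⟨?_, ?_⟩
      · have := List.of_mem_filter hp
        simpa [hpred] using this
      · exact mem_enumerate_lb (h :: t) 0 p (by rw [hE] at hp; exact List.mem_of_mem_filter hp)
    have hpwE : E.Pairwise (fun p q => p.1 < q.1) := by
      have h1 : (E.map (·.1)).Pairwise (· < ·) := by
        rw [hE, PySem.List.map_fst_enumerate]
        exact PySem.List.pairwise_lt_pyRange_one 0 _
      exact List.pairwise_map.mp h1
    rw [scan_eq M m ((h::t).length : Int) hMm (E.filter pred) htypesP (hpwE.filter pred)]
    exact (zip_foldl_eq_adjAcc (E.filter pred) _).symm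

-- ===== VERDICT (by name: the statement is the Claim_ definition above) =====
theorem solve_spec : Claim_equal_solve := by
  intro A _ hA
  unfold Spec_solve
  cases A with
  | nil => exact absurd rfl hA
  | cons h t => exact solve_cons h t
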